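-- pv_equiv track=rewrite | github.com/wilmurillo-ai/Design-Assistant | .skills/openclaw-skills/skills/sakura7301/plum-blossom/plum_blossom.py | _get_biangua
-- ===== SOURCE A (Python) =====
-- from typing import Dict, Tuple
--
-- TRIGRAMS = {
--     1:{"name":"乾","element":"金","symbol":"☰","lines":["yang","yang","yang"]},
--     2:{"name":"兑","element":"金","symbol":"☱","lines":["yang","yang","yin"]},
--     3:{"name":"离","element":"火","symbol":"☲","lines":["yang","yin","yang"]},
--     4:{"name":"震","element":"木","symbol":"☳","lines":["yang","yin","yin"]},
--     5:{"name":"巽","element":"木","symbol":"☴","lines":["yin","yang","yang"]},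
--     6:{"name":"坎","element":"水","symbol":"☵","lines":["yin","yang","yin"]},
--     7:{"name":"艮","element":"土","symbol":"☶","lines":["yin","yin","yang"]},
--     8:{"name":"坤","element":"土","symbol":"☷","lines":["yin","yin","yin"]},
-- }
--
-- def _get_biangua(upper: int, lower: int, mv: int) -> Tuple[int, int]:
--     lower_lines = TRIGRAMS[lower]['lines']
--     upper_lines = TRIGRAMS[upper]['lines']
--     bengua_lines = lower_lines + upper_lines
--     idx = mv - 1
--     bian_gua_lines = bengua_lines.copy()
--     bian_gua_lines[idx] = 'yang' if bian_gua_lines[idx] == 'yin' else 'yin'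
--
--     bian_lower_lines = bian_gua_lines[:3]
--
--     bian_upper_lines = bian_gua_lines[3:]
--
--     def find_trigram(lines):
--         for num, tri in TRIGRAMS.items():
--             if tri['lines'] == lines:
--                 return num
--         return 1
--
--     bian_upper = find_trigram(bian_upper_lines)
--     bian_lower = find_trigram(bian_lower_lines)
--     return bian_upper, bian_lower
-- ===== SOURCE B (Python) =====
-- def _get_biangua(upper, lower, mv):
--     # Arithmetic decode: trigram n <-> 3-bit big-endian code n-1 (yang=0, yin=1).
--     if not 1 <= lower <= 8:
--         raise KeyError(lower)
--     if not 1 <= upper <= 8: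
--         raise KeyError(upper)
--     lo = lower - 1
--     up = upper - 1
--     bits = [(lo >> 2) & 1, (lo >> 1) & 1, lo & 1,
--             (up >> 2) & 1, (up >> 1) & 1, up & 1]
--     bits[mv - 1] = 1 - bits[mv - 1]
--     return (1 + 4 * bits[3] + 2 * bits[4] + bits[5],
--             1 + 4 * bits[0] + 2 * bits[1] + bits[2])
-- ===== Notes on version B (the rewrite author's own statement) =====
-- stated objective: simpler
-- what changed: Replaces the TRIGRAMS table lookups and the linear find_trigram scan with a closed-form 3-bit encode/decode (trigram n = bits of n-1, yang=0/yin=1), flipping one bit and reassembling the two numbers arithmetically.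
import Mathlib
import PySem

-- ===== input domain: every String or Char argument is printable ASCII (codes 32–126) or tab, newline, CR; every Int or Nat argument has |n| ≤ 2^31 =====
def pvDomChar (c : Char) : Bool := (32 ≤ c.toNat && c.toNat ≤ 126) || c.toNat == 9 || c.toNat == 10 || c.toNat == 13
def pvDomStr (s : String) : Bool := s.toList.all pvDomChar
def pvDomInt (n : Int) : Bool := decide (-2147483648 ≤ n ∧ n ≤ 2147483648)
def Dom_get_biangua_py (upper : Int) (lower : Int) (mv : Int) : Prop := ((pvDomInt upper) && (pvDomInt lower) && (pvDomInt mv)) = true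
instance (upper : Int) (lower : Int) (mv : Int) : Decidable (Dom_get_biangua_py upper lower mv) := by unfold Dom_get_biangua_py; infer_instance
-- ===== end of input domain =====

-- B replaces A's trigram-table lookups and linear scan with a closed-form 3-bit encode/decode (simpler).

-- ===== PORT A =====
-- TRIGRAMS, restricted to the 'lines' field A uses (insertion order preserved)
def pvTrigrams : List (Int × List String) :=
  [(1, ["yang","yang","yang"]), (2, ["yang","yang","yin"]),
   (3, ["yang","yin","yang"]),  (4, ["yang","yin","yin"]),
   (5, ["yin","yang","yang"]),  (6, ["yin","yang","yin"]),
   (7, ["yin","yin","yang"]),   (8, ["yin","yin","yin"])]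

-- 'for num, tri in TRIGRAMS.items(): if tri['lines'] == lines: return num; return 1'
def pvFindTrigram (lines : List String) : Int :=
  match pvTrigrams.find? (fun p => p.2 == lines) with
  | some p => p.1
  | none => 1

def get_biangua_py (upper : Int) (lower : Int) (mv : Int) : Int × Int :=
  match PySem.Dict.get? ⟨pvTrigrams⟩ lower, PySem.Dict.get? ⟨pvTrigrams⟩ upper with
  | some lower_lines, some upper_lines =>
    let bengua_lines := lower_lines ++ upper_lines
    let idx := mv - 1
    match PySem.List.pyGet? bengua_lines idx with
    | some cur =>
      let bian_gua_lines := PySem.List.pySetD bengua_lines idx (if cur == "yin" then "yang" else "yin")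
      let bian_lower_lines := PySem.List.slice bian_gua_lines none (some 3)
      let bian_upper_lines := PySem.List.slice bian_gua_lines (some 3) none
      (pvFindTrigram bian_upper_lines, pvFindTrigram bian_lower_lines)
    | none => (0, 0)  -- IndexError (excluded by Pre_)
  | _, _ => (0, 0)    -- KeyError (excluded by Pre_)

-- ===== PORT B =====
def pvBit (n : Int) (k : Int) : Int := PySem.Int.mod (PySem.Int.floordiv n k) 2  -- (n >> log2 k) & 1

def get_biangua_py_alt (upper : Int) (lower : Int) (mv : Int) : Int × Int :=
  if ¬ (1 ≤ lower ∧ lower ≤ 8) then (0, 0)       -- KeyError (outside Pre_)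
  else if ¬ (1 ≤ upper ∧ upper ≤ 8) then (0, 0)  -- KeyError (outside Pre_)
  else
  let lo := lower - 1
  let up := upper - 1
  let bits : List Int := [pvBit lo 4, pvBit lo 2, pvBit lo 1, pvBit up 4, pvBit up 2, pvBit up 1]
  match PySem.List.pyGet? bits (mv - 1) with
  | some b =>
    let bits := PySem.List.pySetD bits (mv - 1) (1 - b)
    (1 + 4 * PySem.List.pyGetD bits 3 0 + 2 * PySem.List.pyGetD bits 4 0 + PySem.List.pyGetD bits 5 0,
     1 + 4 * PySem.List.pyGetD bits 0 0 + 2 * PySem.List.pyGetD bits 1 0 + PySem.List.pyGetD bits 2 0)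
  | none => (0, 0)  -- IndexError (outside Pre_)

-- ===== PRECONDITION & SPEC =====
-- Exactly the inputs on which A returns: valid trigram numbers and a valid (possibly negative) index mv-1 into the 6 lines.
def Pre_get_biangua_py (upper : Int) (lower : Int) (mv : Int) : Prop :=
  (1 ≤ upper ∧ upper ≤ 8) ∧ (1 ≤ lower ∧ lower ≤ 8) ∧ (-5 ≤ mv ∧ mv ≤ 6)
instance (upper : Int) (lower : Int) (mv : Int) : Decidable (Pre_get_biangua_py upper lower mv) := by unfold Pre_get_biangua_py; infer_instance

def pvWitness_get_biangua_py : Int × Int × Int := (3, 6, 2)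

def Spec_get_biangua_py (upper : Int) (lower : Int) (mv : Int) (out : Int × Int) : Prop := out = get_biangua_py_alt upper lower mv
instance (upper : Int) (lower : Int) (mv : Int) (out : Int × Int) : Decidable (Spec_get_biangua_py upper lower mv out) := by unfold Spec_get_biangua_py; infer_instance

-- ===== CLAIM (what is proved, stated in full; the proofs are below) =====
def Claim_equal_get_biangua_py : Prop := ∀ (upper : Int) (lower : Int) (mv : Int), Dom_get_biangua_py upper lower mv → Pre_get_biangua_py upper lower mv → Spec_get_biangua_py upper lower mv (get_biangua_py upper lower mv)


-- ===== LEMMAS AND PROOFS =====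

-- ===== VERDICT (by name: the statement is the Claim_ definition above) =====
theorem get_biangua_py_spec : Claim_equal_get_biangua_py := by
  intro upper lower mv _ pre
  obtain ⟨⟨hu1, hu2⟩, ⟨hl1, hl2⟩, ⟨hm1, hm2⟩⟩ := pre
  unfold Spec_get_biangua_py
  interval_cases upper <;> interval_cases lower <;> interval_cases mv <;> decide
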